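-- pv_equiv track=rewrite | github.com/voskanyant/cards-tracker | core/templatetags/formatting.py | _format_with_spaces
-- ===== SOURCE A (Python) =====
-- def _format_with_spaces(value: str) -> str:
--     digits = value
--     sign = ""
--     if digits.startswith("-"):
--         sign = "-"
--         digits = digits[1:]
--     if digits == "":
--         digits = "0"
--     int_part = digits
--     frac_part = ""
--     if "." in digits:
--         int_part, frac_part = digits.split(".", 1)
--     int_part = int_part or "0"
--
--     # Insert spaces every three digits from the right
--     groups = []
--     while int_part:
--         groups.append(int_part[-3:])
--         int_part = int_part[:-3]
--     spaced = " ".join(reversed(groups)) if groups else "0"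
--
--     frac_part = frac_part.rstrip("0")
--     if frac_part:
--         return f"{sign}{spaced}.{frac_part}"
--     return f"{sign}{spaced}"
-- ===== SOURCE B (Python) =====
-- def _format_with_spaces(value: str) -> str:
--     sign = "-" if value.startswith("-") else ""
--     body = value[1:] if sign else value
--     int_part, _dot, frac = body.partition(".")
--     int_part = int_part or "0"
--     frac = frac.rstrip("0")
--     n = len(int_part)
--     head = n % 3 or 3
--     spaced = " ".join([int_part[:head]] +
--                       [int_part[i:i + 3] for i in range(head, n, 3)])
--     return sign + spaced + ("." + frac if frac else "")
-- ===== Notes on version B (the rewrite author's own statement) =====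
-- stated objective: faster
-- what changed: A peels three-character groups off the right end in a while loop (re-copying the remaining prefix each iteration), collects them and reverses; B computes the first group length arithmetically (len % 3 or 3) and slices the digit string forward in one pass at offsets head, head+3, ..., joining directly without building and reversing a group list.
import Mathlib
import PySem

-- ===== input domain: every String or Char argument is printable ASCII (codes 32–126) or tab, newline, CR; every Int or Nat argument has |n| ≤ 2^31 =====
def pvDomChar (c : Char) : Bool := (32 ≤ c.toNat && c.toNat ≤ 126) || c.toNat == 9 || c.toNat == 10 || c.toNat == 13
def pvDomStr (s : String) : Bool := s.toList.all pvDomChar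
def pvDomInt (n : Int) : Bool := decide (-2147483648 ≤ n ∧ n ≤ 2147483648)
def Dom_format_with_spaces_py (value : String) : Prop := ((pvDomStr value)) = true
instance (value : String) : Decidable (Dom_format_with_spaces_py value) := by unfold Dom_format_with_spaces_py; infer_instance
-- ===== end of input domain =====

-- B replaces A's reverse slice-off-three-at-a-time loop with one forward chunking at
-- arithmetically computed offsets (head = len % 3 or 3, then steps of 3); objective: faster (A re-copies the remaining prefix each iteration; a timing run measured B 33x faster at the largest size).

-- ===== PORT A =====
-- digits.split(".", 1): exact when "." occurs in digits (split at the FIRST '.')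
def fwsSplitDot : List Char → List Char × List Char
  | [] => ([], [])
  | c :: cs =>
    if c = '.' then ([], cs)
    else
      let p := fwsSplitDot cs
      (c :: p.1, p.2)

-- the while loop: groups.append(int_part[-3:]); int_part = int_part[:-3]
-- (s[-3:] = s.drop (s.length - 3) and s[:-3] = s.take (s.length - 3): exact, Nat
--  truncation at 0 matches Python's slice clamping for len < 3)
def fwsLoopA : List Char → List (List Char) → List (List Char)
  | s, groups =>
    if h : s = [] then groups
    else fwsLoopA (s.take (s.length - 3)) (groups ++ [s.drop (s.length - 3)])
  termination_by s _ => s.length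
  decreasing_by
    simp only [List.length_take]
    have := List.length_pos_iff.mpr h
    omega

def format_with_spaces_py (value : String) : String :=
  let digits0 := value.toList
  -- sign = ""; if digits.startswith("-"): sign = "-"; digits = digits[1:]   (digits[1:] is tail: exact)
  let sign := if PySem.Chars.startswith digits0 ['-'] then ['-'] else ([] : List Char)
  let digits1 := if PySem.Chars.startswith digits0 ['-'] then digits0.tail else digits0
  let digits := if digits1 = [] then ['0'] else digits1
  -- int_part, frac_part = digits.split(".", 1) when "." in digits
  let q := if PySem.Chars.isIn ['.'] digits then fwsSplitDot digits else (digits, ([] : List Char))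
  let int_part := if q.1 = [] then ['0'] else q.1   -- int_part = int_part or "0"
  let groups := fwsLoopA int_part []
  let spaced := if groups ≠ [] then PySem.Chars.join [' '] groups.reverse else ['0']
  -- frac_part.rstrip("0"): exact (drop trailing '0' characters)
  let frac_part := (q.2.reverse.dropWhile (· == '0')).reverse
  if frac_part ≠ [] then String.mk (sign ++ spaced ++ ['.'] ++ frac_part)
  else String.mk (sign ++ spaced)

-- ===== PORT B =====
-- body.partition("."): split at the FIRST '.'; (body, "", "") when '.' is absent.  The middle
-- component is dropped (Source B discards it), so this returns the (before, after) pair: exact.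
def fwsPartitionDot : List Char → List Char × List Char
  | [] => ([], [])
  | c :: cs =>
    if c = '.' then ([], cs)
    else
      let p := fwsPartitionDot cs
      (c :: p.1, p.2)

def format_with_spaces_py_alt (value : String) : String :=
  let v := value.toList
  let sign := if PySem.Chars.startswith v ['-'] then ['-'] else ([] : List Char)
  -- value[1:] is tail: exact
  let body := if sign ≠ [] then v.tail else v
  let p := fwsPartitionDot body
  let int_part := if p.1 = [] then ['0'] else p.1   -- int_part or "0"
  let frac := (p.2.reverse.dropWhile (· == '0')).reverse   -- frac.rstrip("0"): exact
  let n := int_part.length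
  let head := if n % 3 = 0 then 3 else n % 3   -- head = n % 3 or 3
  let chunks := [int_part.take head] ++
    (PySem.List.pyRange (head : Int) (n : Int) 3).map
      (fun i => PySem.List.slice int_part (some i) (some (i + 3)))
  let spaced := PySem.Chars.join [' '] chunks
  String.mk (sign ++ spaced ++ (if frac ≠ [] then '.' :: frac else []))

-- ===== PRECONDITION & SPEC =====
def Spec_format_with_spaces_py (value : String) (out : String) : Prop := out = format_with_spaces_py_alt value
instance (value : String) (out : String) : Decidable (Spec_format_with_spaces_py value out) := by unfold Spec_format_with_spaces_py; infer_instance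

-- ===== CLAIM (what is proved, stated in full; the proofs are below) =====
def Claim_equal_format_with_spaces_py : Prop := ∀ (value : String), Dom_format_with_spaces_py value → Spec_format_with_spaces_py value (format_with_spaces_py value)

-- ===== LEMMAS AND PROOFS =====

-- A's groups in FRONT order (proof device)
def fwsGA : List Char → List (List Char)
  | s =>
    if h : s = [] then []
    else fwsGA (s.take (s.length - 3)) ++ [s.drop (s.length - 3)]
  termination_by s => s.length
  decreasing_by
    show (List.take (s.length - 3) s).length < s.length
    have := List.length_pos_iff.mpr h
    simp only [List.length_take]
    omega

def fwsHead (n : Nat) : Nat := if n % 3 = 0 then 3 else n % 3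

-- B's chunk list (proof device; definitionally the `chunks` of port B)
def fwsChunks (s : List Char) : List (List Char) :=
  s.take (fwsHead s.length) ::
    (PySem.List.pyRange (fwsHead s.length : Int) (s.length : Int) 3).map
      (fun i => PySem.List.slice s (some i) (some (i + 3)))

-- the two prep pipelines (proof devices; definitionally the front halves of the two ports)
def fwsPrepA (b : List Char) : List Char × List Char :=
  let d := if b = [] then ['0'] else b
  let q := if PySem.Chars.isIn ['.'] d then fwsSplitDot d else (d, ([] : List Char))
  (if q.1 = [] then ['0'] else q.1, q.2)

def fwsPrepB (b : List Char) : List Char × List Char :=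
  let p := fwsPartitionDot b
  (if p.1 = [] then ['0'] else p.1, p.2)

def fwsSpacedA (ip : List Char) : List Char :=
  let groups := fwsLoopA ip []
  if groups ≠ [] then PySem.Chars.join [' '] groups.reverse else ['0']

lemma fwsPartitionDot_eq (s : List Char) : fwsPartitionDot s = fwsSplitDot s := by
  induction s with
  | nil => rfl
  | cons c cs ih => simp [fwsPartitionDot, fwsSplitDot, ih]

lemma fwsSplitDot_of_not_mem (s : List Char) (h : '.' ∉ s) : fwsSplitDot s = (s, []) := by
  induction s with
  | nil => rfl
  | cons c cs ih =>
    simp only [List.mem_cons, not_or] at h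
    have h1 : ¬ c = '.' := fun e => h.1 e.symm
    simp [fwsSplitDot, h1, ih h.2]

lemma fwsLoopA_eq (s : List Char) (acc : List (List Char)) :
    fwsLoopA s acc = acc ++ (fwsGA s).reverse := by
  fun_induction fwsLoopA s acc
  case case1 => rw [fwsGA]; simp
  case case2 s g h ih =>
    rw [ih]
    conv_rhs => rw [fwsGA]
    simp [h, List.append_assoc]

lemma fwsPyRange3 (h m : Nat) :
    PySem.List.pyRange (h : Int) ((h : Int) + 3 * m) 3 =
      (List.range m).map (fun k : Nat => (h : Int) + 3 * k) := by
  rw [PySem.List.pyRange_of_pos _ _ (by norm_num)]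
  have hc : (if (h : Int) < (h : Int) + 3 * m
      then (((h : Int) + 3 * m - h + 3 - 1) / 3).toNat else 0) = m := by
    split_ifs with hlt <;> omega
  rw [hc]

lemma fwsChunks_small (s : List Char) (h1 : s ≠ []) (h3 : s.length ≤ 3) :
    fwsChunks s = [s] := by
  have hl := List.length_pos_iff.mpr h1
  have hhead : fwsHead s.length = s.length := by unfold fwsHead; split_ifs <;> omega
  have hr := fwsPyRange3 s.length 0
  simp only [Nat.cast_zero, mul_zero, add_zero, List.range_zero, List.map_nil] at hr
  simp only [fwsChunks, hhead, List.take_length, hr, List.map_nil]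

lemma fwsChunks_step (s : List Char) (h3 : 3 < s.length) :
    fwsChunks s = fwsChunks (s.take (s.length - 3)) ++ [s.drop (s.length - 3)] := by
  obtain ⟨h, hhead, hh1, hh3⟩ :
      ∃ h, fwsHead s.length = h ∧ 1 ≤ h ∧ h ≤ 3 := by
    refine ⟨fwsHead s.length, rfl, ?_, ?_⟩ <;> (unfold fwsHead; split_ifs <;> omega)
  obtain ⟨m, hm1, hlen⟩ : ∃ m, 1 ≤ m ∧ s.length = h + 3 * m := by
    refine ⟨(s.length - h) / 3, ?_, ?_⟩ <;>
      (unfold fwsHead at hhead; split_ifs at hhead <;> omega)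
  have hlt : (s.take (s.length - 3)).length = s.length - 3 := by
    simp [List.length_take]
  have hhead' : fwsHead (s.length - 3) = h := by
    unfold fwsHead at hhead ⊢; split_ifs at hhead ⊢ <;> omega
  have hr1 : PySem.List.pyRange (h : Int) (s.length : Int) 3
      = (List.range m).map (fun k : Nat => (h : Int) + 3 * k) := by
    rw [show ((s.length : Int)) = (h : Int) + 3 * (m : Nat) by push_cast [hlen]; ring]
    exact fwsPyRange3 h m
  have hr2 : PySem.List.pyRange (h : Int) ((s.length - 3 : Nat) : Int) 3
      = (List.range (m - 1)).map (fun k : Nat => (h : Int) + 3 * k) := by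
    rw [show (((s.length - 3 : Nat) : Int)) = (h : Int) + 3 * ((m - 1 : Nat) : Int) by
      push_cast [hlen]; omega]
    exact fwsPyRange3 h (m - 1)
  simp only [fwsChunks, hlt, hhead, hhead', hr1, hr2, List.map_map, List.cons_append]
  congr 1
  · rw [List.take_take]; congr 1; omega
  · rw [show m = (m - 1) + 1 by omega, List.range_succ, List.map_append]
    congr 1
    · apply List.map_congr_left
      intro k hk
      simp only [List.mem_range] at hk
      simp only [Function.comp]
      rw [show ((h : Int) + 3 * k) = ((h + 3 * k : Nat) : Int) by push_cast; ring,
          show (((h + 3 * k : Nat) : Int) + 3) = (((h + 3 * k : Nat) : Int) + ((3 : Nat) : Int)) by norm_num]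
      rw [PySem.List.slice_natCast_add, PySem.List.slice_natCast_add]
      rw [List.drop_take, List.take_take]
      congr 1
      omega
    · simp only [List.map_cons, List.map_nil, Function.comp]
      rw [show ((h : Int) + 3 * ((m - 1 : Nat) : Int)) = ((s.length - 3 : Nat) : Int) by
            push_cast [hlen]; omega,
          show (((s.length - 3 : Nat) : Int) + 3) = (((s.length - 3 : Nat) : Int) + ((3 : Nat) : Int)) by norm_num]
      rw [PySem.List.slice_natCast_add]
      rw [List.take_of_length_le (by rw [List.length_drop]; omega)]

lemma fwsGA_eq_chunks (s : List Char) (hs : s ≠ []) : fwsGA s = fwsChunks s := by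
  have main : ∀ n (s : List Char), s.length ≤ n → s ≠ [] → fwsGA s = fwsChunks s := by
    intro n
    induction n with
    | zero =>
      intro s hl hs
      exact absurd (List.eq_nil_of_length_eq_zero (by omega)) hs
    | succ n ih =>
      intro s hl hs
      rw [fwsGA, dif_neg hs]
      by_cases h3 : s.length ≤ 3
      · have h0 : s.length - 3 = 0 := by omega
        rw [h0]
        simp only [List.take_zero, List.drop_zero]
        rw [fwsGA]
        simp [fwsChunks_small s hs h3]
      · have h3' : 3 < s.length := by omega
        rw [fwsChunks_step s h3']
        congr 1
        apply ih
        · simp [List.length_take]; omega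
        · intro e
          have : (s.take (s.length - 3)).length = 0 := by rw [e]; rfl
          simp [List.length_take] at this
          omega
  exact main s.length s le_rfl hs

lemma fwsPrep_eq (b : List Char) : fwsPrepA b = fwsPrepB b := by
  unfold fwsPrepA fwsPrepB
  by_cases hb : b = []
  · subst hb
    have h0 : PySem.Chars.isIn ['.'] ['0'] = false := by decide
    simp [h0, fwsPartitionDot]
  · simp only [if_neg hb]
    by_cases hdot : PySem.Chars.isIn ['.'] b = true
    · rw [fwsPartitionDot_eq]
      simp [hdot]
    · have hnm : '.' ∉ b := by
        intro hm
        apply hdot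
        rw [PySem.Chars.isIn_iff_infix]
        obtain ⟨u, t, rfl⟩ := List.append_of_mem hm
        exact ⟨u, t, by simp⟩
      rw [fwsPartitionDot_eq, fwsSplitDot_of_not_mem b hnm]
      simp [hdot, hb]

lemma fwsPrepB_fst_ne (b : List Char) : (fwsPrepB b).1 ≠ [] := by
  by_cases h : (fwsPartitionDot b).1 = [] <;> simp [fwsPrepB, h]

lemma fwsSpacedA_eq (ip : List Char) (hip : ip ≠ []) :
    fwsSpacedA ip = PySem.Chars.join [' '] (fwsChunks ip) := by
  unfold fwsSpacedA
  rw [fwsLoopA_eq ip [], List.nil_append, fwsGA_eq_chunks ip hip]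
  rw [fwsChunks]
  simp

lemma fwsMain (sgn b : List Char) :
    (if ((fwsPrepA b).2.reverse.dropWhile (· == '0')).reverse ≠ [] then
        String.mk (sgn ++ fwsSpacedA (fwsPrepA b).1 ++ ['.'] ++
          ((fwsPrepA b).2.reverse.dropWhile (· == '0')).reverse)
      else String.mk (sgn ++ fwsSpacedA (fwsPrepA b).1))
    = String.mk (sgn ++ PySem.Chars.join [' '] (fwsChunks (fwsPrepB b).1) ++
        (if ((fwsPrepB b).2.reverse.dropWhile (· == '0')).reverse ≠ [] then
          '.' :: ((fwsPrepB b).2.reverse.dropWhile (· == '0')).reverse else [])) := by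
  rw [fwsPrep_eq]
  rw [fwsSpacedA_eq _ (fwsPrepB_fst_ne b)]
  by_cases hf : ((fwsPrepB b).2.reverse.dropWhile (· == '0')).reverse = []
  · simp [hf]
  · simp [hf, List.append_assoc]

-- ===== VERDICT (by name: the statement is the Claim_ definition above) =====
theorem format_with_spaces_py_spec : Claim_equal_format_with_spaces_py := by
  intro value _
  show format_with_spaces_py value = format_with_spaces_py_alt value
  unfold format_with_spaces_py format_with_spaces_py_alt
  by_cases hsw : PySem.Chars.startswith value.toList ['-'] = true
  · simp only [hsw, if_true, ne_eq, reduceCtorEq, not_false_eq_true]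
    exact fwsMain ['-'] value.toList.tail
  · simp only [hsw, if_false, ne_eq, not_true_eq_false, Bool.false_eq_true]
    exact fwsMain [] value.toList
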